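-- pv_equiv track=rewrite | github.com/alaahmet/advent-of-code | 2024/day7_2.py | f
-- ===== SOURCE A (Python) =====
-- def conc(x, y):
--     dg = len(str(abs(y)))
--     return x * 10 ** dg + y
--
-- def f(goal, curr, nums, idx):
--     if idx == len(nums):
--         if curr == goal:
--             return curr
--         else:
--             return 0
--     num = nums[idx]
--     val1 = f(goal, curr + num, nums, idx + 1)
--     val2 = f(goal, curr * num, nums, idx + 1)
--     val3 = f(goal, conc(curr, num), nums, idx + 1)
--     return max(val1, val2, val3)
-- ===== SOURCE B (Python) =====
-- def conc(x, y):
--     dg = len(str(abs(y)))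
--     return x * 10 ** dg + y
--
-- def f(goal, curr, nums, idx):
--     reachable = [curr]
--     for i in range(idx, len(nums)):
--         num = nums[i]
--         reachable = [op for v in reachable
--                      for op in (v + num, v * num, conc(v, num))]
--     return max((goal if v == goal else 0) for v in reachable)
-- ===== Notes on version B (the rewrite author's own statement) =====
-- stated objective: alternative
-- what changed: A's depth-first recursion, taking the max of three recursive calls at every node, is replaced by an iterative breadth-first loop that expands one level list of reachable running totals per position and takes a single max over the scored final level.
import Mathlib
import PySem

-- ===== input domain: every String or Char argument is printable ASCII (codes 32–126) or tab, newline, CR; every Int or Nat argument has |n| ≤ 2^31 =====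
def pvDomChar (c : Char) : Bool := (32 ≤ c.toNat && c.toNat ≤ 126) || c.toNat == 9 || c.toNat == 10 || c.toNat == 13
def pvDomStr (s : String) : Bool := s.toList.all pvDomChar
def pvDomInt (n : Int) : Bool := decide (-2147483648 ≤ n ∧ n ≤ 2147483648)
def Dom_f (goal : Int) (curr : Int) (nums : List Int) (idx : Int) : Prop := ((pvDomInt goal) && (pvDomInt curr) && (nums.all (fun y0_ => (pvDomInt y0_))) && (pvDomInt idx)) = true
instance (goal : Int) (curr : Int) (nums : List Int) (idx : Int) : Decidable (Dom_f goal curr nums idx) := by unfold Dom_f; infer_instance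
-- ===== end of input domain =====

-- B replaces A's depth-first recursion (max of three recursive calls at every node) by an
-- iterative breadth-first loop that expands one level LIST of reachable running totals per
-- position and takes a single max of the scored list at the end (objective: alternative).

-- ===== PORT A =====
-- conc(x, y): dg = len(str(abs(y))); x * 10 ** dg + y.
-- dg ≥ 1 always, so '10 ** dg' is ported exactly as '10 ^ dg.toNat'.
def conc (x : Int) (y : Int) : Int :=
  let dg : Int := PySem.Str.len (PySem.Int.toStr |y|)
  x * 10 ^ dg.toNat + y

-- termination helper for the ports' recursion/fold: a successful index means idx < len
theorem pyGet?_some_lt {α : Type} {xs : List α} {i : Int} {x : α}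
    (h : PySem.List.pyGet? xs i = some x) : i < (xs.length : Int) := by
  by_cases hr : PySem.Raise.InRange xs.length i
  · unfold PySem.Raise.InRange at hr; omega
  · rw [← PySem.List.pyGet?_eq_none_iff] at hr; simp [hr] at h

def f (goal : Int) (curr : Int) (nums : List Int) (idx : Int) : Int :=
  if idx = (nums.length : Int) then
    if curr = goal then curr else 0
  else
    match h : PySem.List.pyGet? nums idx with
    | none => 0    -- Python raises IndexError here; excluded by Pre_f
    | some num =>
      max (f goal (curr + num) nums (idx + 1))
        (max (f goal (curr * num) nums (idx + 1))
          (f goal (conc curr num) nums (idx + 1)))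
termination_by ((nums.length : Int) - idx).toNat
decreasing_by all_goals · have := pyGet?_some_lt h; omega

-- ===== PORT B =====
-- one step of the level loop: reachable = [v+num, v*num, conc(v,num) for v in reachable ...]
def bstep (nums : List Int) (s : List Int) (i : Int) : List Int :=
  match PySem.List.pyGet? nums i with
  | none => s    -- Python raises IndexError here; excluded by Pre_f
  | some num => s.flatMap fun v => [v + num, v * num, conc v num]

def f_alt (goal : Int) (curr : Int) (nums : List Int) (idx : Int) : Int :=
  let reachable : List Int :=
    (PySem.List.pyRange idx (nums.length : Int) 1).foldl (bstep nums) [curr]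
  (PySem.List.max? (reachable.map fun v => if v = goal then goal else 0)
    (fun x => x)).getD 0

-- ===== PRECONDITION & SPEC =====
-- Pre_f: exactly the inputs on which A returns (outside it A's first nums[idx] access,
-- direct or after the recursion reaches idx > len(nums), raises IndexError).
def Pre_f (goal : Int) (curr : Int) (nums : List Int) (idx : Int) : Prop :=
  -(nums.length : Int) ≤ idx ∧ idx ≤ (nums.length : Int)
instance (goal : Int) (curr : Int) (nums : List Int) (idx : Int) : Decidable (Pre_f goal curr nums idx) := by unfold Pre_f; infer_instance

def pvWitness_f : Int × Int × List Int × Int := (29, 1, [2, 3, 5], 0)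

def Spec_f (goal : Int) (curr : Int) (nums : List Int) (idx : Int) (out : Int) : Prop := out = f_alt goal curr nums idx
instance (goal : Int) (curr : Int) (nums : List Int) (idx : Int) (out : Int) : Decidable (Spec_f goal curr nums idx out) := by unfold Spec_f; infer_instance

-- ===== CLAIM (what is proved, stated in full; the proofs are below) =====
def Claim_equal_f : Prop := ∀ (goal : Int) (curr : Int) (nums : List Int) (idx : Int), Dom_f goal curr nums idx → Pre_f goal curr nums idx → Spec_f goal curr nums idx (f goal curr nums idx)

-- ===== LEMMAS AND PROOFS =====

-- the multiset of leaf running totals of A's call tree (proof-only helper)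
def reach (nums : List Int) (curr : Int) (idx : Int) : List Int :=
  if idx = (nums.length : Int) then [curr]
  else
    match h : PySem.List.pyGet? nums idx with
    | none => [curr]
    | some num =>
      reach nums (curr + num) (idx + 1) ++ reach nums (curr * num) (idx + 1) ++
        reach nums (conc curr num) (idx + 1)
termination_by ((nums.length : Int) - idx).toNat
decreasing_by all_goals · have := pyGet?_some_lt h; omega

-- unfolding equations for reach and f (the dependent match blocks plain rw)
theorem reach_base (nums : List Int) (v : Int) : reach nums v (nums.length : Int) = [v] := by
  rw [reach]; simp

theorem reach_step {nums : List Int} {idx num : Int} (hidx : idx ≠ (nums.length : Int))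
    (hnum : PySem.List.pyGet? nums idx = some num) (v : Int) :
    reach nums v idx = reach nums (v + num) (idx + 1) ++ reach nums (v * num) (idx + 1) ++
      reach nums (conc v num) (idx + 1) := by
  rw [reach]
  simp only [if_neg hidx]
  split
  · next h => rw [hnum] at h; cases h
  · next n h => rw [hnum] at h; injection h with he; subst he; rfl

theorem f_base (goal : Int) (curr : Int) (nums : List Int) :
    f goal curr nums (nums.length : Int) = if curr = goal then curr else 0 := by
  rw [f]; simp

theorem f_step {nums : List Int} {idx num : Int} (hidx : idx ≠ (nums.length : Int))
    (hnum : PySem.List.pyGet? nums idx = some num) (goal curr : Int) :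
    f goal curr nums idx = max (f goal (curr + num) nums (idx + 1))
      (max (f goal (curr * num) nums (idx + 1)) (f goal (conc curr num) nums (idx + 1))) := by
  rw [f]
  simp only [if_neg hidx]
  split
  · next h => rw [hnum] at h; cases h
  · next n h => rw [hnum] at h; injection h with he; subst he; rfl

-- Python max of a nonempty int list is THE greatest element (ties collapse: values equal)
theorem pymax_eq {l : List Int} {m : Int} (hm : m ∈ l) (hmax : ∀ y ∈ l, y ≤ m) :
    PySem.List.max? l (fun x => x) = some m := by
  cases h : PySem.List.max? l (fun x => x) with
  | none =>
    rw [PySem.List.max?_eq_none_iff] at h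
    subst h; simp at hm
  | some m' =>
    have h1 : m' ∈ l := PySem.List.max?_mem h
    have h2 : m ≤ m' := by simpa using PySem.List.max?_isMax h m hm
    have h3 : m' ≤ m := hmax m' h1
    simp [le_antisymm h3 h2]

-- A-side characterisation: f is the max of the scored leaves of its call tree
theorem f_eq_max_reach (goal : Int) (nums : List Int) :
    ∀ (n : Nat) (curr idx : Int), -(nums.length : Int) ≤ idx → idx ≤ (nums.length : Int) →
      ((nums.length : Int) - idx).toNat ≤ n →
      PySem.List.max? ((reach nums curr idx).map fun v => if v = goal then goal else 0)
          (fun x => x) = some (f goal curr nums idx) := by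
  intro n
  induction n with
  | zero =>
    intro curr idx h1 h2 h3
    have hidx : idx = (nums.length : Int) := by omega
    subst hidx
    rw [reach_base, f_base]
    by_cases hc : curr = goal <;> simp [hc, PySem.List.max?]
  | succ n ih =>
    intro curr idx h1 h2 h3
    by_cases hidx : idx = (nums.length : Int)
    · subst hidx
      rw [reach_base, f_base]
      by_cases hc : curr = goal <;> simp [hc, PySem.List.max?]
    · have hlt : idx < (nums.length : Int) := by omega
      have hget : ∃ num, PySem.List.pyGet? nums idx = some num := by
        cases hg : PySem.List.pyGet? nums idx with
        | none =>
          rw [PySem.List.pyGet?_eq_none_iff] at hg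
          exact absurd (by unfold PySem.Raise.InRange; omega) hg
        | some num => exact ⟨num, rfl⟩
      obtain ⟨num, hnum⟩ := hget
      rw [reach_step hidx hnum, f_step hidx hnum]
      have ih1 := ih (curr + num) (idx + 1) (by omega) (by omega) (by omega)
      have ih2 := ih (curr * num) (idx + 1) (by omega) (by omega) (by omega)
      have ih3 := ih (conc curr num) (idx + 1) (by omega) (by omega) (by omega)
      set v1 := f goal (curr + num) nums (idx + 1)
      set v2 := f goal (curr * num) nums (idx + 1)
      set v3 := f goal (conc curr num) nums (idx + 1)
      apply pymax_eq
      · -- the max of the three is one of the three, each present in its own block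
        have m1 := PySem.List.max?_mem ih1
        have m2 := PySem.List.max?_mem ih2
        have m3 := PySem.List.max?_mem ih3
        simp only [List.map_append, List.mem_append]
        rcases max_cases v2 v3 with ⟨he, _⟩ | ⟨he, _⟩ <;>
          rcases max_cases v1 (max v2 v3) with ⟨he2, _⟩ | ⟨he2, _⟩ <;>
            rw [he2] <;> simp [he, m1, m2, m3]
      · intro y hy
        simp only [List.map_append, List.mem_append] at hy
        rcases hy with (hy | hy) | hy
        · have := PySem.List.max?_isMax ih1 y hy; simp at this; omega
        · have := PySem.List.max?_isMax ih2 y hy; simp at this; omega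
        · have := PySem.List.max?_isMax ih3 y hy; simp at this; omega

-- B-side characterisation: the level loop expands a list into the leaves of its call trees
theorem foldl_bstep_eq (nums : List Int) :
    ∀ (n : Nat) (idx : Int) (S : List Int), -(nums.length : Int) ≤ idx →
      idx ≤ (nums.length : Int) → ((nums.length : Int) - idx).toNat ≤ n →
      (PySem.List.pyRange idx (nums.length : Int) 1).foldl (bstep nums) S =
        S.flatMap fun v => reach nums v idx := by
  intro n
  induction n with
  | zero =>
    intro idx S h1 h2 h3
    have hidx : idx = (nums.length : Int) := by omega
    subst hidx
    rw [PySem.List.pyRange_one_eq_nil (by omega)]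
    simp [reach_base]
  | succ n ih =>
    intro idx S h1 h2 h3
    by_cases hidx : idx = (nums.length : Int)
    · subst hidx
      rw [PySem.List.pyRange_one_eq_nil (by omega)]
      simp [reach_base]
    · have hlt : idx < (nums.length : Int) := by omega
      have hget : ∃ num, PySem.List.pyGet? nums idx = some num := by
        cases hg : PySem.List.pyGet? nums idx with
        | none =>
          rw [PySem.List.pyGet?_eq_none_iff] at hg
          exact absurd (by unfold PySem.Raise.InRange; omega) hg
        | some num => exact ⟨num, rfl⟩
      obtain ⟨num, hnum⟩ := hget
      rw [PySem.List.pyRange_one_cons hlt]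
      simp only [List.foldl_cons]
      rw [ih (idx + 1) _ (by omega) (by omega) (by omega)]
      unfold bstep
      simp only [hnum, List.flatMap_assoc]
      have hfun : (fun v => ([v + num, v * num, conc v num] : List Int).flatMap
          fun w => reach nums w (idx + 1)) = fun v => reach nums v idx := by
        funext v
        rw [reach_step hidx hnum v]
        simp [List.append_assoc]
      rw [hfun]

-- ===== VERDICT (by name: the statement is the Claim_ definition above) =====
theorem f_spec : Claim_equal_f := by
  intro goal curr nums idx _ hpre
  obtain ⟨h1, h2⟩ := hpre
  unfold Spec_f f_alt
  rw [foldl_bstep_eq nums ((nums.length : Int) - idx).toNat idx [curr] h1 h2 le_rfl]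
  simp only [List.flatMap_cons, List.flatMap_nil, List.append_nil]
  rw [f_eq_max_reach goal nums ((nums.length : Int) - idx).toNat curr idx h1 h2 le_rfl]
  rfl
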